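-- pv_equiv track=rewrite | github.com/At0mn1yIvan/unnmarkup | unet/unet_ecg.py | extract_segments_from_mask_array
-- ===== SOURCE A (Python) =====
-- def extract_segments_from_mask_array(mask_array, class_id_map_inverse):
--     segments = {wave_name: [] for wave_name in class_id_map_inverse.values()}
--     for class_id, wave_name in class_id_map_inverse.items():
--         in_segment = False
--         start_idx = -1
--         for i, label in enumerate(mask_array):
--             if label == class_id and not in_segment:
--                 in_segment = True
--                 start_idx = i
--             elif label != class_id and in_segment:
--                 in_segment = False
--                 segments[wave_name].append((start_idx, i - 1))
--                 start_idx = -1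
--         if in_segment:
--             segments[wave_name].append((start_idx, len(mask_array) - 1))
--     return segments
-- ===== SOURCE B (Python) =====
-- def extract_segments_from_mask_array(mask_array, class_id_map_inverse):
--     # One sweep over the mask collects every maximal constant run once,
--     # then each class picks its runs out of that list.
--     runs = []
--     cur = None  # (label, start) of the open run
--     for i, label in enumerate(mask_array):
--         if cur is None:
--             cur = (label, i)
--         elif label != cur[0]:
--             runs.append((cur[0], cur[1], i - 1))
--             cur = (label, i)
--     if cur is not None:
--         runs.append((cur[0], cur[1], len(mask_array) - 1))
--     segments = {wave_name: [] for wave_name in class_id_map_inverse.values()}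
--     for class_id, wave_name in class_id_map_inverse.items():
--         segments[wave_name].extend((s, e) for l, s, e in runs if l == class_id)
--     return segments
-- ===== Notes on version B (the rewrite author's own statement) =====
-- stated objective: alternative
-- what changed: A rescans the whole mask once per class in the map; B sweeps the mask once to collect all maximal constant runs and then each class picks its runs out of that run list.
import Mathlib
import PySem

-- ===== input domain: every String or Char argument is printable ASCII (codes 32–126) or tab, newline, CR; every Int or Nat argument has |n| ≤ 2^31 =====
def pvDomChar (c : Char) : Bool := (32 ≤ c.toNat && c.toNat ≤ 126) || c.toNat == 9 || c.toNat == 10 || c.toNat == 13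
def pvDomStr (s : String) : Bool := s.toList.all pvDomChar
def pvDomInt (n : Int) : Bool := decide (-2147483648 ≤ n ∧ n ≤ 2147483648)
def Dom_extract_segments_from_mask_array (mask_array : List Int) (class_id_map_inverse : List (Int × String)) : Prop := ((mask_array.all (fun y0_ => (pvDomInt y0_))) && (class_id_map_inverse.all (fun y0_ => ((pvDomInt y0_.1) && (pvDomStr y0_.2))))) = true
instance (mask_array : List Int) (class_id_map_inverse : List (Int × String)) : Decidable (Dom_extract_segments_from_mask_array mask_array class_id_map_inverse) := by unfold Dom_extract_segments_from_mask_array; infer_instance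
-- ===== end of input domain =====

-- B replaces A's per-class rescans of the mask by ONE sweep that collects all maximal
-- constant runs, from which each class then picks its own runs (objective: alternative).

-- ===== PORT A =====
-- per-class inner loop body: 'for i, label in enumerate(mask_array): …'
def pvAstep (cid : Int) (w : String)
    (st : Bool × Int × PySem.Dict String (List (Int × Int))) (q : Int × Int) :
    Bool × Int × PySem.Dict String (List (Int × Int)) :=
  if q.2 = cid ∧ st.1 = false then (true, q.1, st.2.2)
  else if q.2 ≠ cid ∧ st.1 = true then
    (false, -1, st.2.2.modify w [] (fun l => l ++ [(st.2.1, q.1 - 1)]))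
  else st

-- one iteration of A's outer 'for class_id, wave_name in class_id_map_inverse.items():'
def pvAclass (mask_array : List Int) (cid : Int) (w : String)
    (segs : PySem.Dict String (List (Int × Int))) : PySem.Dict String (List (Int × Int)) :=
  let st := (PySem.List.enumerate mask_array).foldl (pvAstep cid w) (false, -1, segs)
  if st.1 then st.2.2.modify w [] (fun l => l ++ [(st.2.1, (mask_array.length : Int) - 1)])
  else st.2.2

def extract_segments_from_mask_array (mask_array : List Int) (class_id_map_inverse : List (Int × String)) : List (String × List (Int × Int)) :=
  let segments : PySem.Dict String (List (Int × Int)) :=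
    class_id_map_inverse.foldl (fun d p => d.insert p.2 []) PySem.Dict.empty
  (class_id_map_inverse.foldl (fun d p => pvAclass mask_array p.1 p.2 d) segments).items

-- ===== PORT B =====
-- single-sweep loop body: grow or close the current run
def pvBstep (st : Option (Int × Int) × List (Int × Int × Int)) (q : Int × Int) :
    Option (Int × Int) × List (Int × Int × Int) :=
  match st.1 with
  | none => (some (q.2, q.1), st.2)
  | some c => if q.2 ≠ c.1 then (some (q.2, q.1), st.2 ++ [(c.1, c.2, q.1 - 1)]) else st

-- all maximal constant runs of the mask, as (label, start, end)
def pvBruns (mask_array : List Int) : List (Int × Int × Int) :=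
  let st := (PySem.List.enumerate mask_array).foldl pvBstep (none, [])
  match st.1 with
  | some c => st.2 ++ [(c.1, c.2, (mask_array.length : Int) - 1)]
  | none => st.2

-- '(s, e) for l, s, e in runs if l == class_id'
def pvFlt (cid : Int) (runs : List (Int × Int × Int)) : List (Int × Int) :=
  runs.filterMap (fun r => if r.1 = cid then some (r.2.1, r.2.2) else none)

def extract_segments_from_mask_array_alt (mask_array : List Int) (class_id_map_inverse : List (Int × String)) : List (String × List (Int × Int)) :=
  let runs := pvBruns mask_array
  let segments : PySem.Dict String (List (Int × Int)) :=
    class_id_map_inverse.foldl (fun d p => d.insert p.2 []) PySem.Dict.empty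
  (class_id_map_inverse.foldl (fun d p => d.modify p.2 [] (fun l => l ++ pvFlt p.1 runs)) segments).items

-- ===== PRECONDITION & SPEC =====
def Spec_extract_segments_from_mask_array (mask_array : List Int) (class_id_map_inverse : List (Int × String)) (out : List (String × List (Int × Int))) : Prop := out = extract_segments_from_mask_array_alt mask_array class_id_map_inverse
instance (mask_array : List Int) (class_id_map_inverse : List (Int × String)) (out : List (String × List (Int × Int))) : Decidable (Spec_extract_segments_from_mask_array mask_array class_id_map_inverse out) := by unfold Spec_extract_segments_from_mask_array; infer_instance

-- ===== CLAIM (what is proved, stated in full; the proofs are below) =====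
def Claim_equal_extract_segments_from_mask_array : Prop := ∀ (mask_array : List Int) (class_id_map_inverse : List (Int × String)), Dom_extract_segments_from_mask_array mask_array class_id_map_inverse → Spec_extract_segments_from_mask_array mask_array class_id_map_inverse (extract_segments_from_mask_array mask_array class_id_map_inverse)

-- ===== LEMMAS AND PROOFS =====

-- Dict facts: a repeated insert at the same key collapses, so two modifies compose,
-- and appending nothing to an existing key is the identity.
theorem pv_insert_insert {κ ν : Type} [BEq κ] [LawfulBEq κ] (d : PySem.Dict κ ν) (k : κ) (v v' : ν) :
    (d.insert k v).insert k v' = d.insert k v' := by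
  apply PySem.Dict.ext
  by_cases h : d.contains k = true
  · rw [PySem.Dict.items_insert_of_contains _ v' (PySem.Dict.contains_insert_self d k v),
        PySem.Dict.items_insert_of_contains _ v h, PySem.Dict.items_insert_of_contains _ v' h,
        List.map_map]
    apply List.map_congr_left
    intro p _
    by_cases hp : p.1 = k <;> simp [Function.comp, hp]
  · have h' : d.contains k = false := by simpa using h
    rw [PySem.Dict.items_insert_of_contains _ v' (PySem.Dict.contains_insert_self d k v),
        PySem.Dict.items_insert_of_not_contains _ v h',
        PySem.Dict.items_insert_of_not_contains _ v' h',
        List.map_append]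
    have hne : ∀ p ∈ d.items, p.1 ≠ k := by
      intro p hp hpk
      have : k ∈ d.keys := by
        simp only [PySem.Dict.keys]
        exact hpk ▸ List.mem_map_of_mem hp
      simp [(PySem.Dict.contains_iff_mem_keys d k).2 this] at h'
    have : List.map (fun p => if (p.1 == k) = true then (k, v') else p) d.items = d.items := by
      apply List.map_congr_left .. |>.trans (List.map_id _)
      intro p hp; simp [hne p hp]
    rw [this]; simp

theorem pv_modify_modify {κ ν : Type} [BEq κ] [LawfulBEq κ] (d : PySem.Dict κ ν) (k : κ)
    (d0 : ν) (f g : ν → ν) :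
    (d.modify k d0 f).modify k d0 g = d.modify k d0 (fun v => g (f v)) := by
  simp [PySem.Dict.modify, PySem.Dict.getD_insert_self, pv_insert_insert]

theorem pv_modify_id {κ α : Type} [BEq κ] [LawfulBEq κ] (d : PySem.Dict κ (List α)) (k : κ) (d0 : List α)
    (hk : k ∈ d.keys) (hnd : d.keys.Nodup) :
    d.modify k d0 (fun v => v ++ []) = d := by
  have hc : d.contains k = true := (PySem.Dict.contains_iff_mem_keys d k).2 hk
  obtain ⟨v, hv⟩ : ∃ v, (k, v) ∈ d.items := by
    simp only [PySem.Dict.keys, List.mem_map] at hk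
    obtain ⟨p, hp, hpk⟩ := hk
    exact ⟨p.2, by rwa [show (k, p.2) = p from by ext <;> simp [hpk.symm]]⟩
  have hg : d.getD k d0 = v := PySem.Dict.getD_of_mem_items d hv hnd d0
  apply PySem.Dict.ext
  rw [PySem.Dict.modify, PySem.Dict.items_insert_of_contains _ _ hc]
  apply List.map_congr_left .. |>.trans (List.map_id _)
  intro p hp
  by_cases hpk : p.1 = k
  · have hp2 : p.2 = v := by
      have h1 : d.get? p.1 = some p.2 :=
        PySem.Dict.get?_of_mem_items d (by simpa using hp) hnd
      have h2 : d.get? k = some v := PySem.Dict.get?_of_mem_items d hv hnd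
      rw [hpk] at h1; rw [h1] at h2; injection h2
    simp [hpk, hg]
    exact Prod.ext hpk.symm hp2.symm
  · simp [hpk]

theorem pv_keys_modify_of_mem {κ ν : Type} [BEq κ] [LawfulBEq κ] (d : PySem.Dict κ ν) (k : κ)
    (d0 : ν) (f : ν → ν) (hk : k ∈ d.keys) :
    (d.modify k d0 f).keys = d.keys := by
  rw [PySem.Dict.modify,
      PySem.Dict.keys_insert_of_contains _ _ ((PySem.Dict.contains_iff_mem_keys d k).2 hk)]

-- reference form of A's per-class scan (cur = start of the open segment, i = next index)
def pvSegs (cid : Int) (i : Int) (cur : Option Int) : List Int → List (Int × Int)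
  | [] => match cur with | some s => [(s, i - 1)] | none => []
  | x :: t =>
    match cur with
    | some s => if x = cid then pvSegs cid (i+1) (some s) t else (s, i - 1) :: pvSegs cid (i+1) none t
    | none => if x = cid then pvSegs cid (i+1) (some i) t else pvSegs cid (i+1) none t

-- reference form of B's sweep (cur = open run, i = next index)
def pvRuns (i : Int) (cur : Option (Int × Int)) : List Int → List (Int × Int × Int)
  | [] => match cur with | some c => [(c.1, c.2, i - 1)] | none => []
  | x :: t =>
    match cur with
    | none => pvRuns (i+1) (some (x, i)) t
    | some c => if x = c.1 then pvRuns (i+1) (some c) t else (c.1, c.2, i - 1) :: pvRuns (i+1) (some (x, i)) t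

def pvAflush (w : String) (st : Bool × Int × PySem.Dict String (List (Int × Int))) (n : Int) :
    PySem.Dict String (List (Int × Int)) :=
  if st.1 then st.2.2.modify w [] (fun l => l ++ [(st.2.1, n - 1)]) else st.2.2

-- A's inner fold + final flush computes 'append pvSegs' on the dict
theorem pvA_fold (cid : Int) (w : String) :
    ∀ (t : List Int) (i : Int) (cur : Option Int) (d : PySem.Dict String (List (Int × Int))),
    w ∈ d.keys → d.keys.Nodup →
    pvAflush w ((PySem.List.enumerate t i).foldl (pvAstep cid w) (cur.isSome, cur.getD (-1), d))
        (i + (t.length : Int))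
    = d.modify w [] (fun l => l ++ pvSegs cid i cur t) := by
  intro t
  induction t with
  | nil =>
    intro i cur d hw hnd
    cases cur with
    | some s => simp [PySem.List.enumerate, pvAflush, pvSegs]
    | none =>
      simp only [PySem.List.enumerate, List.foldl_nil, pvAflush, Option.isSome_none,
        Bool.false_eq_true, pvSegs, ite_false]
      exact (pv_modify_id d w [] hw hnd).symm
  | cons x t ih =>
    intro i cur d hw hnd
    rw [PySem.List.enumerate_cons]
    have hn : i + ((x :: t).length : Int) = (i + 1) + (t.length : Int) := by simp; ring
    rw [hn]
    cases cur with
    | some s =>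
      by_cases hx : x = cid
      · simp only [List.foldl_cons, pvAstep, hx, Option.isSome_some, pvSegs,
          if_pos]
        simpa using ih (i+1) (some s) d hw hnd
      · simp only [List.foldl_cons, pvAstep, Option.isSome_some, Option.getD_some, pvSegs,
          hx, false_and, ne_eq, not_false_eq_true, and_true,
          if_neg, if_pos]
        have hw' : w ∈ (d.modify w [] (fun l => l ++ [(s, i - 1)])).keys := by
          rw [pv_keys_modify_of_mem d w [] _ hw]; exact hw
        have hnd' : (d.modify w [] (fun l => l ++ [(s, i - 1)])).keys.Nodup := by
          rw [pv_keys_modify_of_mem d w [] _ hw]; exact hnd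
        have := ih (i+1) none (d.modify w [] (fun l => l ++ [(s, i - 1)])) hw' hnd'
        simp only [Option.isSome_none, Option.getD_none] at this
        rw [this, pv_modify_modify]
        congr 1
        funext l
        simp
    | none =>
      by_cases hx : x = cid
      · simp only [List.foldl_cons, pvAstep, Option.isSome_none, Option.getD_none, pvSegs,
          hx, if_pos, and_true, and_true]
        simpa using ih (i+1) (some i) d hw hnd
      · simp only [List.foldl_cons, pvAstep, Option.isSome_none, Option.getD_none, pvSegs,
          hx, false_and, ite_false]
        simpa using ih (i+1) none d hw hnd

def pvBflush (st : Option (Int × Int) × List (Int × Int × Int)) (n : Int) : List (Int × Int × Int) :=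
  match st.1 with
  | some c => st.2 ++ [(c.1, c.2, n - 1)]
  | none => st.2

-- B's fold + final flush computes pvRuns
theorem pvB_fold :
    ∀ (t : List Int) (i : Int) (cur : Option (Int × Int)) (acc : List (Int × Int × Int)),
    pvBflush ((PySem.List.enumerate t i).foldl pvBstep (cur, acc)) (i + (t.length : Int))
    = acc ++ pvRuns i cur t := by
  intro t
  induction t with
  | nil =>
    intro i cur acc
    cases cur <;> simp [PySem.List.enumerate, pvBflush, pvRuns]
  | cons x t ih =>
    intro i cur acc
    rw [PySem.List.enumerate_cons]
    have hn : i + ((x :: t).length : Int) = (i + 1) + (t.length : Int) := by simp; ring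
    rw [hn]
    cases cur with
    | none =>
      simp only [List.foldl_cons, pvBstep, pvRuns]
      exact ih (i+1) (some (x, i)) acc
    | some c =>
      by_cases hx : x = c.1
      · simp only [List.foldl_cons, pvBstep, hx, pvRuns, ne_eq, not_true_eq_false, ite_false]
        simpa [hx] using ih (i+1) (some c) acc
      · simp only [List.foldl_cons, pvBstep, pvRuns, hx, ne_eq, not_false_eq_true, ite_true, if_neg]
        rw [ih (i+1) (some (x, i)) (acc ++ [(c.1, c.2, i - 1)])]
        simp

-- per-class scan = filter of the run list (same open-state on both sides)
theorem pvSegs_eq_flt_some (cid : Int) :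
    ∀ (t : List Int) (i l s : Int),
    pvSegs cid i (if l = cid then some s else none) t = pvFlt cid (pvRuns i (some (l, s)) t) := by
  intro t
  induction t with
  | nil =>
    intro i l s
    by_cases hl : l = cid <;> simp [pvSegs, pvRuns, pvFlt, hl]
  | cons x t ih =>
    intro i l s
    by_cases hx : x = l
    · by_cases hl : l = cid <;>
        simp only [pvSegs, pvRuns, hx, hl, ite_true, ite_false] <;>
        simpa [hx, hl] using ih (i+1) l s
    · by_cases hl : l = cid
      · have hxc : ¬ x = cid := fun h => hx (h.trans hl.symm)
        simp only [pvSegs, pvRuns, hl, ite_true, if_neg hxc]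
        simp only [pvFlt, List.filterMap_cons]
        have := ih (i+1) x i
        rw [if_neg hxc] at this
        simp [pvFlt] at this ⊢
        exact this
      · simp only [pvSegs, pvRuns, hl, ite_false, if_neg (show ¬ x = l from hx)]
        simp only [pvFlt, List.filterMap_cons, if_neg hl]
        have := ih (i+1) x i
        by_cases hxc : x = cid
        · subst hxc; rw [if_pos rfl] at this; simpa using this
        · rw [if_neg hxc] at this; simp only [hxc, ite_false]; exact this

theorem pvSegs_eq_flt_none (cid : Int) (t : List Int) (i : Int) :
    pvSegs cid i none t = pvFlt cid (pvRuns i none t) := by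
  cases t with
  | nil => simp [pvSegs, pvRuns, pvFlt]
  | cons x t =>
    simp only [pvSegs, pvRuns]
    have := pvSegs_eq_flt_some cid t (i+1) x i
    by_cases hxc : x = cid
    · subst hxc; rw [if_pos rfl] at this; simpa using this
    · rw [if_neg hxc] at this; simp only [hxc, ite_false]; exact this

theorem pvBruns_eq (mask : List Int) : pvBruns mask = pvRuns 0 none mask := by
  have := pvB_fold mask 0 none []
  simpa [pvBruns, pvBflush] using this

theorem pvAclass_eq (mask : List Int) (cid : Int) (w : String)
    (d : PySem.Dict String (List (Int × Int))) (hw : w ∈ d.keys) (hnd : d.keys.Nodup) :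
    pvAclass mask cid w d = d.modify w [] (fun l => l ++ pvFlt cid (pvBruns mask)) := by
  have := pvA_fold cid w mask 0 none d hw hnd
  simp only [Option.isSome_none, Option.getD_none, zero_add] at this
  rw [pvBruns_eq, ← pvSegs_eq_flt_none, ← this]
  simp [pvAclass, pvAflush]

-- the two outer folds agree on any dict containing every wave name
theorem pv_outer (mask : List Int) :
    ∀ (m : List (Int × String)) (d : PySem.Dict String (List (Int × Int))),
    (∀ p ∈ m, p.2 ∈ d.keys) → d.keys.Nodup →
    m.foldl (fun d p => pvAclass mask p.1 p.2 d) d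
    = m.foldl (fun d p => d.modify p.2 [] (fun l => l ++ pvFlt p.1 (pvBruns mask))) d := by
  intro m
  induction m with
  | nil => intro d _ _; rfl
  | cons p m ih =>
    intro d hmem hnd
    simp only [List.foldl_cons]
    rw [pvAclass_eq mask p.1 p.2 d (hmem p (List.mem_cons_self)) hnd]
    apply ih
    · intro q hq
      rw [pv_keys_modify_of_mem d p.2 [] _ (hmem p List.mem_cons_self)]
      exact hmem q (List.mem_cons_of_mem _ hq)
    · rw [pv_keys_modify_of_mem d p.2 [] _ (hmem p List.mem_cons_self)]
      exact hnd

-- ===== VERDICT (by name: the statement is the Claim_ definition above) =====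
theorem extract_segments_from_mask_array_spec : Claim_equal_extract_segments_from_mask_array := by
  intro mask m _
  unfold Spec_extract_segments_from_mask_array
  unfold extract_segments_from_mask_array extract_segments_from_mask_array_alt
  dsimp only
  congr 1
  apply pv_outer
  · intro p hp
    rw [PySem.Dict.keys_foldl_insert_key]
    simp only [PySem.Dict.keys_empty, PySem.Set.update_nil_left]
    exact (PySem.Set.mem_ofList _ _).2 (List.mem_map_of_mem hp)
  · rw [PySem.Dict.keys_foldl_insert_key]
    simp only [PySem.Dict.keys_empty, PySem.Set.update_nil_left]
    exact PySem.Set.nodup_ofList _
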